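-- pv_equiv track=rewrite | github.com/SeongHunTed/Algorithm | Algorithm/Programmers/Level2/131704.py | solution
-- ===== SOURCE A (Python) =====
-- def solution(order):
--     answer = 0
--     subContainer = []
--     index = 0
--     box = 1
--
--     while True:
--         if index >= len(order):
--             break
--
--         if box > len(order):
--             if order[index] != subContainer[-1]:
--                 break
--
--         if box == order[index]:
--             answer += 1
--             index += 1
--             box += 1
--         elif len(subContainer) > 0 and subContainer[-1] == order[index]:
--             subContainer.pop()
--             answer += 1
--             index += 1
--         else:
--             subContainer.append(box)
--             box += 1
--
--     return answer
-- ===== SOURCE B (Python) =====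
-- def solution(order):
--     # Stack-free reformulation: the simulated stack always holds exactly the
--     # not-yet-delivered box numbers below `box`, in increasing order.  So instead
--     # of maintaining a stack we keep a `delivered` set: order[i] is deliverable
--     # directly iff box <= o <= n (jump box to o+1), and from the "stack" iff
--     # 1 <= o < box, o is undelivered and every box strictly between o and box
--     # has already been delivered (o is the top, i.e. the max undelivered < box).
--     n = len(order)
--     delivered = set()
--     box = 1
--     answer = 0
--     for o in order:
--         if box <= o <= n:
--             box = o + 1
--         elif 1 <= o < box and o not in delivered and all(k in delivered for k in range(o + 1, box)):
--             pass
--         else: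
--             break
--         delivered.add(o)
--         answer += 1
--     return answer
-- ===== Notes on version B (the rewrite author's own statement) =====
-- stated objective: alternative
-- what changed: B eliminates the stack entirely: it keeps a set of delivered box numbers plus a next-box counter, and delivers each requested o either by jumping the counter in one step (box <= o <= n, where A pushes every skipped box individually) or by checking that o is the maximum undelivered number below the counter (o undelivered and every k in o+1..box-1 delivered), instead of A's push/pop stack state machine.
import Mathlib
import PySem

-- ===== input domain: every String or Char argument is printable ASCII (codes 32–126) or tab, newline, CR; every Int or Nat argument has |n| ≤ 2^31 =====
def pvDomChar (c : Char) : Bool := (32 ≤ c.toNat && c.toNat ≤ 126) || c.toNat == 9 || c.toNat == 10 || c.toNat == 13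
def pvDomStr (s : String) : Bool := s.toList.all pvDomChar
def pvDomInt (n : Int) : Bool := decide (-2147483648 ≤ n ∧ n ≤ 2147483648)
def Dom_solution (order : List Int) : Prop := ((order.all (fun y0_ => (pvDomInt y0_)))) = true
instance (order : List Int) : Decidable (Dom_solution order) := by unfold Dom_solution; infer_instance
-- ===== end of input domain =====

-- B replaces A's push/pop stack machine by a stack-free algorithm over a set of
-- delivered box numbers plus a next-box counter; objective: alternative.

-- ===== PORT A =====
-- A's flat `while True` over the state (answer, subContainer, index, box).
-- `subContainer[-1]` is ported as `stack.getLast?`; Python's break test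
-- `box > len(order) and order[index] != subContainer[-1]` becomes
-- `len < box ∧ ¬ getLast? = some o`.  On an EMPTY stack Python would raise IndexError in that
-- test, but that state is unreachable from solution's initial state (every box counted by
-- `box - 1` is either delivered or still stacked), so the port's behaviour there is irrelevant.
def solutionGo (order : List Int) (answer : Int) (stack : List Int) (index : Nat) (box : Nat) : Int :=
  if _h1 : order.length ≤ index then answer
  else
    match order[index]? with
    | none => answer  -- unreachable: index < len(order)
    | some o =>
      if _hbrk : order.length < box ∧ ¬ stack.getLast? = some o then
        answer
      else
        if _heq : (box : Int) = o then
          solutionGo order (answer + 1) stack (index + 1) (box + 1)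
        else if _hpop : stack ≠ [] ∧ stack.getLast? = some o then
          solutionGo order (answer + 1) stack.dropLast (index + 1) box
        else
          solutionGo order answer (stack ++ [(box : Int)]) index (box + 1)
termination_by (order.length - index) + (order.length + 1 - box)
decreasing_by
  all_goals first
  | omega
  | (rcases Classical.em (stack = []) with he | he
     · simp [he] at _hbrk
       omega
     · have hne : ¬ stack.getLast? = some o := fun hl => _hpop ⟨he, hl⟩
       have hb : ¬ order.length < box := fun hlt => _hbrk ⟨hlt, hne⟩
       omega)

def solution (order : List Int) : Int :=
  solutionGo order 0 [] 0 1

-- ===== PORT B =====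
-- `for o in order` over the state (delivered : set, box, answer); no stack:
-- deliver directly when box <= o <= n (jump), or from the "conveyor leftovers"
-- when 1 <= o < box, o undelivered and all of o+1..box-1 already delivered.
def bLoop (n : Nat) (rest : List Int) (delivered : PySem.Set Int) (box : Int) (answer : Int) : Int :=
  match rest with
  | [] => answer
  | o :: rest' =>
    if box ≤ o ∧ o ≤ (n : Int) then
      bLoop n rest' (PySem.Set.add delivered o) (o + 1) (answer + 1)
    else if 1 ≤ o ∧ o < box ∧ o ∉ delivered ∧ ∀ k ∈ PySem.List.pyRange (o + 1) box 1, k ∈ delivered then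
      bLoop n rest' (PySem.Set.add delivered o) box (answer + 1)
    else answer

def solution_alt (order : List Int) : Int :=
  bLoop order.length order PySem.Set.empty 1 0

-- ===== PRECONDITION & SPEC =====
def Spec_solution (order : List Int) (out : Int) : Prop := out = solution_alt order
instance (order : List Int) (out : Int) : Decidable (Spec_solution order out) := by unfold Spec_solution; infer_instance

-- ===== CLAIM (what is proved, stated in full; the proofs are below) =====
def Claim_equal_solution : Prop := ∀ (order : List Int), Dom_solution order → Spec_solution order (solution order)

-- ===== LEMMAS AND PROOFS =====

-- the stack A maintains, expressed from B's state: the undelivered numbers in [1, box-1], ascending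
def stackOf (box : Nat) (d : List Int) : List Int :=
  ((List.range' 1 (box - 1)).map (fun (k : Nat) => (k : Int))).filter (fun x => decide (x ∉ d))

lemma mem_stackOf {box : Nat} {d : List Int} {x : Int} (h : x ∈ stackOf box d) :
    1 ≤ x ∧ x < (box : Int) ∧ x ∉ d := by
  unfold stackOf at h
  rw [List.mem_filter] at h
  obtain ⟨hm, hd⟩ := h
  rw [List.mem_map] at hm
  obtain ⟨k, hk, rfl⟩ := hm
  rw [List.mem_range'_1] at hk
  simp only [decide_eq_true_eq] at hd
  refine ⟨by exact_mod_cast hk.1, by exact_mod_cast (by omega : k < box), hd⟩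

lemma stackOf_nodup (box : Nat) (d : List Int) : (stackOf box d).Nodup := by
  apply List.Nodup.filter
  exact (List.nodup_range').map (fun a b h => by exact_mod_cast h)

lemma stackOf_succ (box : Nat) (hb : 1 ≤ box) (d : List Int) :
    stackOf (box + 1) d
      = stackOf box d ++ (if (box : Int) ∈ d then [] else [(box : Int)]) := by
  have h1 : box + 1 - 1 = (box - 1) + 1 := by omega
  unfold stackOf
  rw [h1, List.range'_concat, List.map_append, List.filter_append]
  have h3 : 1 + 1 * (box - 1) = box := by omega
  rw [h3]
  by_cases h : (box : Int) ∈ d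
  · rw [if_pos h]
    simp [h]
  · rw [if_neg h]
    simp [h]

lemma stackOf_add_of_ge (box : Nat) (d : List Int) (e : Int) (he : (box : Int) ≤ e) :
    stackOf box (PySem.Set.add d e) = stackOf box d := by
  unfold stackOf
  apply List.filter_congr
  intro x hx
  simp only [List.mem_map, List.mem_range'] at hx
  obtain ⟨k, ⟨i, hi, hk⟩, rfl⟩ := hx
  have hxe : (k : Int) ≠ e := by
    have : k < box := by omega
    have : (k : Int) < (box : Int) := by exact_mod_cast this
    omega
  simp [PySem.Set.mem_add, hxe]

-- characterization of A's stack top from B's state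
lemma getLast_stackOf (box : Nat) (d : List Int) (o : Int) :
    (stackOf box d).getLast? = some o
      ↔ (1 ≤ o ∧ o < (box : Int) ∧ o ∉ d ∧ ∀ k : Int, o < k → k < (box : Int) → k ∈ d) := by
  induction box with
  | zero =>
    constructor
    · intro h; simp [stackOf] at h
    · rintro ⟨h1, h2, -⟩; omega
  | succ b ih =>
    rcases Nat.eq_zero_or_pos b with hb | hb
    · subst hb
      constructor
      · intro h; simp [stackOf] at h
      · rintro ⟨h1, h2, -⟩; omega
    · rw [stackOf_succ b hb d]
      by_cases hmem : (b : Int) ∈ d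
      · rw [if_pos hmem]
        simp only [List.append_nil]
        rw [ih]
        constructor
        · rintro ⟨h1, h2, h3, h4⟩
          refine ⟨h1, by push_cast; omega, h3, fun k hk1 hk2 => ?_⟩
          push_cast at hk2
          rcases eq_or_lt_of_le (by omega : k ≤ (b : Int)) with rfl | hlt
          · exact hmem
          · exact h4 k hk1 hlt
        · rintro ⟨h1, h2, h3, h4⟩
          have hne : o ≠ (b : Int) := fun h => h3 (h ▸ hmem)
          push_cast at h2
          refine ⟨h1, by omega, h3, fun k hk1 hk2 => h4 k hk1 (by omega)⟩
      · rw [if_neg hmem]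
        rw [List.getLast?_append_cons, List.getLast?_singleton]
        constructor
        · rintro ⟨rfl⟩
          refine ⟨by exact_mod_cast hb, by push_cast; omega, hmem, fun k hk1 hk2 => ?_⟩
          push_cast at hk2; omega
        · rintro ⟨h1, h2, h3, h4⟩
          push_cast at h2
          rcases eq_or_lt_of_le (by omega : o ≤ (b : Int)) with rfl | hlt
          · rfl
          · exact absurd (h4 (b : Int) hlt (by push_cast; omega)) hmem

-- popping the top o is the same as marking o delivered
lemma filter_ne_getLast (l : List Int) (o : Int) (hn : l.Nodup) (hl : l.getLast? = some o) :
    l.filter (fun x => decide (x ≠ o)) = l.dropLast := by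
  induction l with
  | nil => simp at hl
  | cons a t ih =>
    cases t with
    | nil =>
      simp only [List.getLast?_singleton, Option.some.injEq] at hl
      subst hl
      simp
    | cons b t' =>
      rw [List.getLast?_cons_cons] at hl
      have hmem : o ∈ b :: t' := List.mem_of_getLast? hl
      have hao : a ≠ o := fun h => (List.nodup_cons.mp hn).1 (h ▸ hmem)
      rw [List.filter_cons_of_pos (by simp [hao]), ih (List.nodup_cons.mp hn).2 hl]
      rfl

-- popping the top o is the same as marking o delivered
lemma stackOf_pop (box : Nat) (d : List Int) (o : Int)
    (h : (stackOf box d).getLast? = some o) :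
    (stackOf box d).dropLast = stackOf box (PySem.Set.add d o) := by
  have hmemo : ∀ x : Int, (x ∉ PySem.Set.add d o) ↔ (x ∉ d ∧ x ≠ o) := by
    intro x
    rw [PySem.Set.mem_add]
    tauto
  have hfil : stackOf box (PySem.Set.add d o) = (stackOf box d).filter (fun x => decide (x ≠ o)) := by
    unfold stackOf
    rw [List.filter_filter]
    apply List.filter_congr
    intro x _
    simp [and_comm]
  rw [hfil]
  exact (filter_ne_getLast _ o (stackOf_nodup box d) h).symm

-- B takes the same step whether its counter is box or box+1, when o ≠ box,
-- o is not A's stack top, and everything delivered is below box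
lemma bLoop_box_succ (n : Nat) (o : Int) (rest : List Int) (d : List Int) (box : Nat) (answer : Int)
    (h1 : (box : Int) ≠ o)
    (h2 : ¬ (1 ≤ o ∧ o < (box : Int) ∧ o ∉ d ∧ ∀ k ∈ PySem.List.pyRange (o + 1) (box : Int) 1, k ∈ d))
    (hd : ∀ x ∈ d, x < (box : Int)) :
    bLoop n (o :: rest) d (box : Int) answer = bLoop n (o :: rest) d ((box : Int) + 1) answer := by
  simp only [bLoop]
  by_cases hc1 : (box : Int) ≤ o ∧ o ≤ (n : Int)
  · rw [if_pos hc1, if_pos (show ((box : Int) + 1) ≤ o ∧ o ≤ (n : Int) from ⟨by omega, hc1.2⟩)]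
  · have hc1' : ¬ (((box : Int) + 1) ≤ o ∧ o ≤ (n : Int)) := fun hc => hc1 ⟨by omega, hc.2⟩
    have hnew : ¬ (1 ≤ o ∧ o < ((box : Int) + 1) ∧ o ∉ d ∧
        ∀ k ∈ PySem.List.pyRange (o + 1) ((box : Int) + 1) 1, k ∈ d) := by
      rintro ⟨hk1, hk2, hk3, hk4⟩
      have hob : o < (box : Int) := by omega
      have hbd : (box : Int) ∈ d := hk4 _ (by rw [PySem.List.mem_pyRange_one]; omega)
      exact absurd (hd _ hbd) (by omega)
    rw [if_neg hc1, if_neg hc1', if_neg h2, if_neg hnew]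

-- main simulation: A's stack machine equals B's delivered-set loop
lemma loop_eq (order : List Int) (answer : Int) (stack : List Int) (index box : Nat) (d : List Int) :
    stack = stackOf box d →
    (∀ x ∈ d, 1 ≤ x ∧ x < (box : Int)) →
    1 ≤ box →
    solutionGo order answer stack index box
      = bLoop order.length (order.drop index) d (box : Int) answer := by
  fun_induction solutionGo order answer stack index box generalizing d with
  | case1 answer stack index box h1 =>
    intro _ _ _
    rw [List.drop_eq_nil_of_le h1, bLoop]
  | case2 answer stack index box h1 hnone =>
    intro _ _ _
    exact absurd hnone (by simp; omega)
  | case3 answer stack index box h1 o ho hbrk =>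
    intro hst hinv hb
    have hdrop : order.drop index = o :: order.drop (index + 1) := by
      rw [List.drop_eq_getElem_cons (by omega)]
      simp only [List.getElem?_eq_some_iff] at ho
      obtain ⟨_, ho⟩ := ho
      simp [ho]
    rw [hdrop]
    simp only [bLoop]
    rw [if_neg (by rintro ⟨hle, hlen⟩; omega)]
    rw [if_neg (fun hc => hbrk.2 (by
      rw [hst, getLast_stackOf]
      exact ⟨hc.1, hc.2.1, hc.2.2.1, fun k hk1 hk2 =>
        hc.2.2.2 k (PySem.List.mem_pyRange_one.mpr ⟨by omega, hk2⟩)⟩))]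
  | case4 answer stack index box h1 ho hbrk ih =>
    -- box == order[index]: A matches directly; B jumps its counter by one
    intro hst hinv hb
    have hdrop : order.drop index = ((box : Int)) :: order.drop (index + 1) := by
      rw [List.drop_eq_getElem_cons (by omega)]
      simp only [List.getElem?_eq_some_iff] at ho
      obtain ⟨_, ho⟩ := ho
      simp [ho]
    have htop : ¬ stack.getLast? = some (box : Int) := by
      intro hl
      have hl' : ((box : Int)) ∈ stackOf box d := by rw [← hst]; exact List.mem_of_getLast? hl
      have hmem := mem_stackOf hl'
      omega
    have hble : box ≤ order.length := by
      by_contra hc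
      exact hbrk ⟨by omega, htop⟩
    rw [hdrop]
    simp only [bLoop]
    rw [if_pos ⟨le_refl _, by exact_mod_cast hble⟩]
    have hst' : stack = stackOf (box + 1) (PySem.Set.add d (box : Int)) := by
      rw [stackOf_succ box hb, if_pos (by rw [PySem.Set.mem_add]; right; rfl),
        List.append_nil, stackOf_add_of_ge box d _ (le_refl _), hst]
    have := ih (PySem.Set.add d (box : Int)) hst' (fun x hx => by
      rcases (PySem.Set.mem_add _ _ _).mp hx with hx' | rfl
      · have := hinv x hx'; push_cast; omega
      · push_cast; omega) (by omega)
    rw [show ((box : Int) + 1) = (((box + 1 : Nat)) : Int) by push_cast; ring]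
    exact this
  | case5 answer stack index box h1 o ho hbrk heq hpop ih =>
    -- top of stack matches: A pops, B marks o delivered (it is the max undelivered < box)
    intro hst hinv hb
    have hchar := (getLast_stackOf box d o).mp (hst ▸ hpop.2)
    obtain ⟨hc1, hc2, hc3, hc4⟩ := hchar
    have hdrop : order.drop index = o :: order.drop (index + 1) := by
      rw [List.drop_eq_getElem_cons (by omega)]
      simp only [List.getElem?_eq_some_iff] at ho
      obtain ⟨_, ho⟩ := ho
      simp [ho]
    rw [hdrop]
    simp only [bLoop]
    rw [if_neg (by rintro ⟨hle, _⟩; omega)]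
    rw [if_pos ⟨hc1, hc2, hc3, fun k hk => by
      rw [PySem.List.mem_pyRange_one] at hk
      exact hc4 k (by omega) hk.2⟩]
    apply ih
    · rw [hst]; exact stackOf_pop box d o (hst ▸ hpop.2)
    · intro x hx
      rcases (PySem.Set.mem_add _ _ _).mp hx with hx' | rfl
      · exact hinv x hx'
      · exact ⟨hc1, hc2⟩
    · exact hb
  | case6 answer stack index box h1 o ho hbrk heq hpop ih =>
    -- A pushes one box: B's state is unchanged, only the counter correspondence shifts
    intro hst hinv hb
    have htop : ¬ stack.getLast? = some o := by
      intro hl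
      exact hpop ⟨by rintro rfl; simp at hl, hl⟩
    have hble : box ≤ order.length := by
      by_contra hc
      exact hbrk ⟨by omega, htop⟩
    have hdrop : order.drop index = o :: order.drop (index + 1) := by
      rw [List.drop_eq_getElem_cons (by omega)]
      simp only [List.getElem?_eq_some_iff] at ho
      obtain ⟨_, ho⟩ := ho
      simp [ho]
    have hst' : stack ++ [(box : Int)] = stackOf (box + 1) d := by
      rw [stackOf_succ box hb d,
        if_neg (fun hc => by have := (hinv _ hc).2; omega), hst]
    have hmain := ih d hst' (fun x hx => by have := hinv x hx; push_cast; omega) (by omega)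
    rw [hdrop, bLoop_box_succ order.length o _ d box answer heq
      (fun hc => htop (by
        rw [hst, getLast_stackOf]
        exact ⟨hc.1, hc.2.1, hc.2.2.1, fun k hk1 hk2 =>
          hc.2.2.2 k (PySem.List.mem_pyRange_one.mpr ⟨by omega, hk2⟩)⟩))
      (fun x hx => (hinv x hx).2), ← hdrop]
    rw [show ((box : Int) + 1) = (((box + 1 : Nat)) : Int) by push_cast; ring]
    exact hmain

-- ===== VERDICT (by name: the statement is the Claim_ definition above) =====
theorem solution_spec : Claim_equal_solution := by
  intro order _
  unfold Spec_solution solution solution_alt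
  simpa using loop_eq order 0 [] 0 1 PySem.Set.empty (by simp [stackOf]) (by simp [PySem.Set.empty]) le_rfl
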